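-- pv_equiv track=rewrite | github.com/buz321/-_- | 프로그래머스/unrated/181854. 배열의 길이에 따라 다른 연산하기/배열의 길이에 따라 다른 연산하기.py | solution
-- ===== SOURCE A (Python) =====
-- def solution(arr, n):
--     answer = []
--     if len(arr) % 2 == 0:
--         for i in range(len(arr)):
--             if i % 2 == 1:
--                 arr[i] += n
--     else:
--         for j in range(len(arr)):
--             if j % 2 == 0:
--                 arr[j] += n
--
--     return arr
-- ===== SOURCE B (Python) =====
-- def solution(arr, n):
--     start = 1 if len(arr) % 2 == 0 else 0
--     arr[start::2] = [x + n for x in arr[start::2]]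
--     return arr
-- ===== Notes on version B (the rewrite author's own statement) =====
-- stated objective: idiomatic
-- what changed: Replaces the two index-by-index loops with a parity test each with a single computed start offset and one strided slice assignment over the whole list.
import Mathlib
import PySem

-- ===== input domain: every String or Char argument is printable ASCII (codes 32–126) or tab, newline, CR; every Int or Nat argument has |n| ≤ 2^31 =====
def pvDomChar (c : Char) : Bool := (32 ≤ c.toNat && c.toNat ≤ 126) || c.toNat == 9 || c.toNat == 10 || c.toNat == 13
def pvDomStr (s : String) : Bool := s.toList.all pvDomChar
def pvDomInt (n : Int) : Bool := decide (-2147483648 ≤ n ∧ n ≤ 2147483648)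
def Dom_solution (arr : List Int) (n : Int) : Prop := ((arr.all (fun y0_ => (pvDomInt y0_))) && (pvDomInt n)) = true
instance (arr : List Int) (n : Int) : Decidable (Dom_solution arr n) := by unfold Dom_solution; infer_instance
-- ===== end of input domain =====

-- B replaces A's two parity-branched index loops by one computed start offset and a single
-- strided slice assignment (idiomatic). Both Pythons mutate `arr` in place identically and
-- return it; the theorems below are about the returned value.

-- ===== PORT A =====
-- A: branch on parity of len, loop over all indices, in-place `arr[i] += n` on odd/even indices.
def solution (arr : List Int) (n : Int) : List Int :=
  if arr.length % 2 == 0 then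
    (List.range arr.length).foldl
      (fun a i => if i % 2 == 1 then a.set i (a.getD i 0 + n) else a) arr
  else
    (List.range arr.length).foldl
      (fun a j => if j % 2 == 0 then a.set j (a.getD j 0 + n) else a) arr

-- ===== PORT B =====
-- B: start = 1 if len even else 0; slice assignment arr[start::2] = [x+n for x in arr[start::2]].
-- The strided slice positions start, start+2, … are exactly the indices i with i % 2 = start
-- (start ∈ {0,1}), so the slice assignment is ported as an index-conditional map — exact.
def solution_alt (arr : List Int) (n : Int) : List Int :=
  let start : Nat := if arr.length % 2 == 0 then 1 else 0
  arr.mapIdx (fun i x => if i % 2 == start then x + n else x)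

-- ===== PRECONDITION & SPEC =====
def Spec_solution (arr : List Int) (n : Int) (out : List Int) : Prop := out = solution_alt arr n
instance (arr : List Int) (n : Int) (out : List Int) : Decidable (Spec_solution arr n out) := by unfold Spec_solution; infer_instance

-- ===== CLAIM (what is proved, stated in full; the proofs are below) =====
def Claim_equal_solution : Prop := ∀ (arr : List Int) (n : Int), Dom_solution arr n → Spec_solution arr n (solution arr n)

-- ===== LEMMAS AND PROOFS =====

-- A's loop over range' j (length suf), acting on pre ++ suf with pre.length = j,
-- rewrites the suffix elementwise according to the index predicate p.
theorem foldA_eq_mapIdx (p : Nat → Bool) (n : Int) :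
    ∀ (suf pre : List Int),
      (List.range' pre.length suf.length).foldl
        (fun a i => if p i then a.set i (a.getD i 0 + n) else a) (pre ++ suf)
      = pre ++ suf.mapIdx (fun k x => if p (pre.length + k) then x + n else x) := by
  intro suf
  induction suf with
  | nil => intro pre; simp
  | cons x suf ih =>
    intro pre
    have hg : (pre ++ x :: suf).getD pre.length 0 = x := by
      simp [List.getD]
    have hs : ∀ y : Int, (pre ++ x :: suf).set pre.length y = (pre ++ [y]) ++ suf := by
      intro y
      simp [List.append_assoc]
    have hstep :
        (if p pre.length then
            (pre ++ x :: suf).set pre.length ((pre ++ x :: suf).getD pre.length 0 + n)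
          else pre ++ x :: suf)
        = (pre ++ [if p pre.length then x + n else x]) ++ suf := by
      by_cases hp : p pre.length <;> simp [hp, hs]
    have hlen : pre.length + 1 = (pre ++ [if p pre.length then x + n else x]).length := by
      simp
    calc (List.range' pre.length (x :: suf).length).foldl
            (fun a i => if p i then a.set i (a.getD i 0 + n) else a) (pre ++ x :: suf)
        = (List.range' (pre.length + 1) suf.length).foldl
            (fun a i => if p i then a.set i (a.getD i 0 + n) else a)
            ((pre ++ [if p pre.length then x + n else x]) ++ suf) := by
          simp only [List.length_cons, List.range'_succ, List.foldl_cons]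
          rw [hstep]
      _ = (pre ++ [if p pre.length then x + n else x]) ++
            suf.mapIdx (fun k y =>
              if p ((pre ++ [if p pre.length then x + n else x]).length + k) then y + n else y) := by
          rw [hlen, ih]
      _ = pre ++ (x :: suf).mapIdx (fun k y => if p (pre.length + k) then y + n else y) := by
          simp only [List.mapIdx_cons, List.append_assoc, List.singleton_append,
            List.length_append, List.length_cons, List.length_nil, Nat.add_zero]
          congr 3
          funext k y
          have hk : pre.length + (0 + 1) + k = pre.length + (k + 1) := by omega
          rw [hk]

theorem foldA_whole (p : Nat → Bool) (n : Int) (arr : List Int) :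
    (List.range arr.length).foldl
      (fun a i => if p i then a.set i (a.getD i 0 + n) else a) arr
    = arr.mapIdx (fun k x => if p k then x + n else x) := by
  have h := foldA_eq_mapIdx p n arr []
  simpa [List.range_eq_range'] using h

-- ===== VERDICT (by name: the statement is the Claim_ definition above) =====
theorem solution_spec : Claim_equal_solution := by
  intro arr n _
  show solution arr n = solution_alt arr n
  unfold solution solution_alt
  by_cases h : arr.length % 2 == 0 <;>
    simp only [h, if_true, if_false, Bool.false_eq_true] <;>
    rw [foldA_whole]
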